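-- pv_equiv track=rewrite | github.com/Imtiaj-Sajin/rent-roll-wizard | backend/extractors/multifamily.py | clean_and_merge_rows
-- ===== SOURCE A (Python) =====
-- from typing import Dict, List, Any
--
-- def clean_and_merge_rows(raw_data: List[List[str]]) -> List[List[str]]:
--     """
--     Fixes the issue where data spills over to the next page/row.
--     Logic: If a row has an EMPTY 'Unit' (Col 0) but has data elsewhere,
--     it is merged into the previous row.
--     """
--     if not raw_data:
--         return []
--
--     # 1. Separate Header from Data
--     header = raw_data[0]
--     data_rows = raw_data[1:]
--
--     # 2. Filter out repeated headers (from multiple pages)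
--     # We assume Column 0 is "Unit". We remove rows where Col 0 says "Unit"
--     cleaned_rows = [row for row in data_rows if row[0] != "Unit"]
--
--     merged_data = []
--     if not cleaned_rows:
--         return [header]
--
--     # Start with the first data row
--     current_primary_row = cleaned_rows[0]
--
--     for i in range(1, len(cleaned_rows)):
--         next_row = cleaned_rows[i]
--
--         # CHECK: Is this a "Spillover" row?
--         # Condition: Unit (Col 0) is Empty AND it has some content in other columns
--         has_no_unit = (next_row[0] == "")
--         has_content = any(cell != "" for cell in next_row)
--
--         if has_no_unit and has_content:
--             # === MERGE LOGIC ===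
--             # Combine next_row into current_primary_row
--             new_merged_row = []
--             for k in range(len(current_primary_row)):
--                 val_main = current_primary_row[k]
--                 val_spill = next_row[k]
--
--                 # Join with space if both exist, otherwise take whichever exists
--                 if val_main and val_spill:
--                     new_merged_row.append(f"{val_main} {val_spill}")
--                 else:
--                     new_merged_row.append(val_main + val_spill)
--
--             # Update the primary row with the merged result
--             current_primary_row = new_merged_row
--         else:
--             # It's a normal new row. Save the finished primary row and start a new one.
--             merged_data.append(current_primary_row)
--             current_primary_row = next_row
--
--     # Append the final processing row
--     merged_data.append(current_primary_row)
--
--     # Return Header + Merged Data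
--     return [header] + merged_data
-- ===== SOURCE B (Python) =====
-- from typing import Dict, List, Any
--
-- def clean_and_merge_rows(raw_data: List[List[str]]) -> List[List[str]]:
--     """Group-then-reduce reformulation: partition the cleaned rows into groups
--     (a new group starts at every non-spillover row), then collapse each group
--     with a column-wise left fold."""
--     if not raw_data:
--         return []
--     header = raw_data[0]
--     cleaned = [row for row in raw_data[1:] if row[0] != "Unit"]
--
--     # One pass: partition into groups; spillover rows join the current group.
--     groups: List[List[List[str]]] = []
--     for row in cleaned:
--         if groups and row[0] == "" and any(cell != "" for cell in row):
--             groups[-1].append(row)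
--         else:
--             groups.append([row])
--
--     # Collapse each group left-to-right, column by column.
--     result = [header]
--     for group in groups:
--         acc = group[0]
--         for row in group[1:]:
--             acc = [f"{x} {y}" if x and y else x + y for x, y in zip(acc, row)]
--         result.append(acc)
--     return result
-- ===== Notes on version B (the rewrite author's own statement) =====
-- stated objective: alternative
-- what changed: Replaced A's single stateful loop carrying a 'current primary row' accumulator by a two-phase decomposition: one pass partitions the cleaned rows into groups (a new group starts at each non-spillover row), then each group is collapsed by a column-wise left fold over zipped rows.
import Mathlib
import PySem

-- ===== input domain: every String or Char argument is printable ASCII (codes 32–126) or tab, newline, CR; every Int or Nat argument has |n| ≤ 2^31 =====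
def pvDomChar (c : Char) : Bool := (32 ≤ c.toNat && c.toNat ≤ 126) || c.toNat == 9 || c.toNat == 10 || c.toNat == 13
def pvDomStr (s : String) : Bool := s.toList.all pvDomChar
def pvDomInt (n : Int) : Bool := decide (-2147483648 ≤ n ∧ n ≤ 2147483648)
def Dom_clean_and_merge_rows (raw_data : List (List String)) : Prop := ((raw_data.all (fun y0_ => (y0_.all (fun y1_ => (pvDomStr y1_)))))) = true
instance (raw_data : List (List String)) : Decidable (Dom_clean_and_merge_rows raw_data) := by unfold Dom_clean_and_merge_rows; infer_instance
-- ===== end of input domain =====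

-- B re-decomposes A's stateful merge loop as group-partitioning followed by a per-group
-- column-wise fold; equal return values are proved on all inputs where A returns (Pre_).

-- A "spillover" row: empty Unit column (col 0) but some non-empty cell.
def pvSpill (r : List String) : Bool := (r.headD "" == "") && r.any (fun c => c != "")

-- ===== PORT A =====
def clean_and_merge_rows (raw_data : List (List String)) : List (List String) :=
  match raw_data with
  | [] => []
  | header :: data_rows =>
    let cleaned := data_rows.filter (fun r => r.headD "" != "Unit")
    match cleaned with
    | [] => [header]
    | c0 :: rest =>
      let st := rest.foldl (fun (st : List (List String) × List String) next_row =>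
        if pvSpill next_row then
          -- merge next_row into the current primary row, column by column
          (st.1, (List.range st.2.length).map (fun k =>
            let vm := st.2.getD k ""
            let vs := next_row.getD k ""   -- getD: Python raises here when k ≥ len(next_row); excluded by Pre_
            if vm ≠ "" ∧ vs ≠ "" then vm ++ " " ++ vs else vm ++ vs))
        else (st.1 ++ [st.2], next_row)) ([], c0)
      header :: (st.1 ++ [st.2])

-- ===== PORT B =====
def pvMerge2 (a b : List String) : List String :=
  (a.zip b).map (fun p => if p.1 ≠ "" ∧ p.2 ≠ "" then p.1 ++ " " ++ p.2 else p.1 ++ p.2)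

def clean_and_merge_rows_alt (raw_data : List (List String)) : List (List String) :=
  match raw_data with
  | [] => []
  | header :: data_rows =>
    let cleaned := data_rows.filter (fun r => r.headD "" != "Unit")
    let groups := cleaned.foldl (fun gs row =>
      if !gs.isEmpty && pvSpill row then
        gs.dropLast ++ [(gs.getLastD []) ++ [row]]
      else gs ++ [[row]]) ([] : List (List (List String)))
    header :: groups.map (fun g => g.tail.foldl pvMerge2 (g.headD []))

-- ===== PRECONDITION & SPEC =====
-- Shape condition "glen = length of the row that started the current group;
-- every spillover row is at least that long" (otherwise Python A raises IndexError).
def pvGroupsOK : Nat → List (List String) → Bool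
  | _, [] => true
  | glen, r :: rs =>
    if pvSpill r then decide (glen ≤ r.length) && pvGroupsOK glen rs else pvGroupsOK r.length rs

-- Pre_ excludes exactly the inputs where A raises IndexError: an empty data row
-- (row[0] in the filter), or a spillover row shorter than its group's starting row.
def Pre_clean_and_merge_rows (raw_data : List (List String)) : Prop :=
  (∀ r ∈ raw_data.tail, r ≠ []) ∧
  (let c := raw_data.tail.filter (fun r => r.headD "" != "Unit")
   c = [] ∨ pvGroupsOK (c.headD []).length c.tail = true)

instance (raw_data : List (List String)) : Decidable (Pre_clean_and_merge_rows raw_data) := by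
  unfold Pre_clean_and_merge_rows; infer_instance

def pvWitness_clean_and_merge_rows : List (List String) :=
  [["Unit", "Name"], ["1", "a"], ["", "b"], ["Unit", "Name"], ["2", "c"]]

def Spec_clean_and_merge_rows (raw_data : List (List String)) (out : List (List String)) : Prop := out = clean_and_merge_rows_alt raw_data
instance (raw_data : List (List String)) (out : List (List String)) : Decidable (Spec_clean_and_merge_rows raw_data out) := by unfold Spec_clean_and_merge_rows; infer_instance

-- ===== CLAIM (what is proved, stated in full; the proofs are below) =====
def Claim_equal_clean_and_merge_rows : Prop := ∀ (raw_data : List (List String)), Dom_clean_and_merge_rows raw_data → Pre_clean_and_merge_rows raw_data → Spec_clean_and_merge_rows raw_data (clean_and_merge_rows raw_data)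

-- ===== LEMMAS AND PROOFS =====

theorem pvMerge2_eq (c r : List String) (h : c.length ≤ r.length) :
    (List.range c.length).map (fun k =>
      let vm := c.getD k ""
      let vs := r.getD k ""
      if vm ≠ "" ∧ vs ≠ "" then vm ++ " " ++ vs else vm ++ vs) = pvMerge2 c r := by
  apply List.ext_getElem
  · simp [pvMerge2, List.length_zip]; omega
  · intro i h1 h2
    simp only [pvMerge2, List.getElem_map, List.getElem_range, List.getElem_zip]
    have hi : i < c.length := by simpa using h1
    have hir : i < r.length := lt_of_lt_of_le hi h
    rw [List.getD_eq_getElem c "" hi, List.getD_eq_getElem r "" hir]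

theorem pvMerge2_length (c r : List String) (h : c.length ≤ r.length) :
    (pvMerge2 c r).length = c.length := by
  simp [pvMerge2, List.length_zip]; omega

-- Proof-only names for the two loop bodies and the group reducer.
def pvStepA : (List (List String) × List String) → List String → (List (List String) × List String) :=
  fun st next_row =>
    if pvSpill next_row then
      (st.1, (List.range st.2.length).map (fun k =>
        let vm := st.2.getD k ""
        let vs := next_row.getD k ""
        if vm ≠ "" ∧ vs ≠ "" then vm ++ " " ++ vs else vm ++ vs))
    else (st.1 ++ [st.2], next_row)

def pvStepB : List (List (List String)) → List String → List (List (List String)) :=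
  fun gs row =>
    if !gs.isEmpty && pvSpill row then
      gs.dropLast ++ [(gs.getLastD []) ++ [row]]
    else gs ++ [[row]]

def pvRed (g : List (List String)) : List String := g.tail.foldl pvMerge2 (g.headD [])

theorem pvRed_append (g : List (List String)) (r : List String) (hg : g ≠ []) :
    pvRed (g ++ [r]) = pvMerge2 (pvRed g) r := by
  cases g with
  | nil => exact absurd rfl hg
  | cons h t => simp [pvRed, List.foldl_append]

theorem pvPortA_cons (header : List String) (t : List (List String)) :
    clean_and_merge_rows (header :: t) =
      (match t.filter (fun r => r.headD "" != "Unit") with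
       | [] => [header]
       | c0 :: rest =>
         header :: ((rest.foldl pvStepA ([], c0)).1 ++ [(rest.foldl pvStepA ([], c0)).2])) := rfl

theorem pvPortB_cons (header : List String) (t : List (List String)) :
    clean_and_merge_rows_alt (header :: t) =
      header :: ((t.filter (fun r => r.headD "" != "Unit")).foldl pvStepB []).map pvRed := rfl

theorem pvLoop_eq (l : List (List String)) :
    ∀ (gs : List (List (List String))) (m : List (List String)) (c : List String),
      gs ≠ [] → (∀ g ∈ gs, g ≠ []) → gs.map pvRed = m ++ [c] →
      pvGroupsOK c.length l = true →
      (l.foldl pvStepB gs).map pvRed =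
        (l.foldl pvStepA (m, c)).1 ++ [(l.foldl pvStepA (m, c)).2] := by
  induction l with
  | nil => intro gs m c _ _ hmap _; simpa using hmap
  | cons r rs ih =>
    intro gs m c hne hgne hmap hok
    simp only [List.foldl_cons]
    cases hs : pvSpill r with
    | true =>
      -- spillover: merge into the last group / the primary row
      obtain h | ⟨ys, y, rfl⟩ := List.eq_nil_or_concat gs
      · exact absurd h hne
      simp only [List.concat_eq_append] at hne hgne hmap ⊢
      have hyne : y ≠ [] := hgne y (by simp)
      have hmap' : ys.map pvRed = m ∧ pvRed y = c := by
        have := hmap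
        simp only [List.map_append] at this
        have h2 := List.append_inj' this rfl
        exact ⟨h2.1, by simpa using h2.2⟩
      have hokr : c.length ≤ r.length ∧ pvGroupsOK c.length rs = true := by
        have := hok
        unfold pvGroupsOK at this
        rw [hs] at this
        simpa using this
      have hB : pvStepB (ys ++ [y]) r = ys ++ [y ++ [r]] := by
        simp [pvStepB, hs]
      have hA : pvStepA (m, c) r = (m, pvMerge2 c r) := by
        simp only [pvStepA, hs, if_true]
        rw [pvMerge2_eq c r hokr.1]
      rw [hB, hA]
      apply ih
      · simp
      · intro g hg
        simp only [List.mem_append, List.mem_singleton] at hg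
        rcases hg with h | h
        · exact hgne g (by simp [h])
        · subst h; simp
      · simp only [List.map_append, List.map_cons, List.map_nil]
        rw [pvRed_append y r hyne, hmap'.1, hmap'.2]
      · rw [pvMerge2_length c r hokr.1]; exact hokr.2
    | false =>
      -- a normal new row: close the group / flush the primary row
      have hB : pvStepB gs r = gs ++ [[r]] := by
        simp [pvStepB, hs]
      have hA : pvStepA (m, c) r = (m ++ [c], r) := by
        simp [pvStepA, hs]
      have hok' : pvGroupsOK r.length rs = true := by
        have := hok
        unfold pvGroupsOK at this
        rw [hs] at this
        simpa using this
      rw [hB, hA]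
      apply ih
      · simp
      · intro g hg
        simp only [List.mem_append, List.mem_singleton] at hg
        rcases hg with h | h
        · exact hgne g h
        · subst h; simp
      · simp only [List.map_append, List.map_cons, List.map_nil]
        rw [hmap]
        simp [pvRed]
      · exact hok'

theorem clean_and_merge_rows_spec : Claim_equal_clean_and_merge_rows := by
  intro raw_data _ hpre
  unfold Spec_clean_and_merge_rows
  cases raw_data with
  | nil => rfl
  | cons header t =>
    rw [pvPortA_cons, pvPortB_cons]
    cases hc : t.filter (fun r => r.headD "" != "Unit") with
    | nil => simp
    | cons c0 rest =>
      simp only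
      have hstep : pvStepB [] c0 = [[c0]] := by simp [pvStepB]
      rw [List.foldl_cons, hstep]
      have hok : pvGroupsOK c0.length rest = true := by
        rcases hpre.2 with h | h
        · rw [List.tail_cons] at h; rw [hc] at h; cases h
        · rw [List.tail_cons, hc] at h; simpa using h
      rw [pvLoop_eq rest [[c0]] [] c0 (by simp) (by intro g hg; simp at hg; subst hg; simp)
          (by simp [pvRed]) hok]
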